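-- pv_equiv track=rewrite | github.com/jcolinpatrick/kryptos | scripts/e_frac_06_w11w13_structural.py | generate_keyword_orderings
-- ===== SOURCE A (Python) =====
-- def generate_keyword_orderings(width, keywords):
--     """Generate column orderings from keywords."""
--     orderings = set()
--     for kw in keywords:
--         kw = kw.upper()[:width]
--         if len(kw) < width:
--             # Pad with unique letters
--             remaining = [c for c in "ABCDEFGHIJKLMNOPQRSTUVWXYZ" if c not in kw]
--             kw = kw + "".join(remaining[:width - len(kw)])
--         order = tuple(sorted(range(width), key=lambda i: (kw[i], i)))
--         orderings.add(order)
--     return list(orderings)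
-- ===== SOURCE B (Python) =====
-- def generate_keyword_orderings(width, keywords):
--     """Generate column orderings from keywords."""
--     orderings = set()
--     for kw in keywords:
--         # pad incrementally: walk the alphabet, appending unused letters until wide enough
--         chars = list(kw.upper())[:width]
--         used = set(chars)
--         for c in "ABCDEFGHIJKLMNOPQRSTUVWXYZ":
--             if len(chars) >= width:
--                 break
--             if c not in used:
--                 chars.append(c)
--         # group-by-character: for each distinct character in ascending order,
--         # emit the ascending positions where it occurs
--         order = []
--         for c in sorted(set(chars)):
--             order.extend(i for i in range(width) if chars[i] == c)
--         orderings.add(tuple(order))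
--     return list(orderings)
-- ===== Notes on version B (the rewrite author's own statement) =====
-- stated objective: alternative
-- what changed: Replaces A's single sort of the index list under the composite key (kw[i], i) by a group-by-character emission (for each distinct character in ascending order, append its ascending positions), and replaces A's filter-then-slice padding by an incremental walk over the alphabet that appends unused letters until the keyword reaches the width.
import Mathlib
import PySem

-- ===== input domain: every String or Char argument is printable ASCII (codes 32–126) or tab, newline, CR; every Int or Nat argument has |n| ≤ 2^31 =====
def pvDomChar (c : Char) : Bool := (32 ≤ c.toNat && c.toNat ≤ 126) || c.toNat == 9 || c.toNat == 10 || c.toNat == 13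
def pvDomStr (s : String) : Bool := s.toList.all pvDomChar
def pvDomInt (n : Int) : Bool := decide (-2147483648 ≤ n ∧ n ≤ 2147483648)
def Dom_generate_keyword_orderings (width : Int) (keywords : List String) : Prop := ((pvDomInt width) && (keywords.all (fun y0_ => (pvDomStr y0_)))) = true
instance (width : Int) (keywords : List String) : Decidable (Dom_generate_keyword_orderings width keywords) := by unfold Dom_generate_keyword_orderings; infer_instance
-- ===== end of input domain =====

-- B replaces A's sort of the indices under key (kw[i], i) by group-by-character emission,
-- pads by walking the alphabet with an incremental append loop instead of filter+slice,
-- and collects the distinct orders by explicit recursion; objective: alternative algorithm.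


-- ===== PORT A =====
-- kw = kw.upper()[:width], padded with the unused letters of A-Z when too short
def pvPadA (width : Int) (kw : String) : List Char :=
  let kw1 := PySem.List.slice (PySem.Chars.upper kw.toList) none (some width)
  if (kw1.length : Int) < width then
    let remaining := ("ABCDEFGHIJKLMNOPQRSTUVWXYZ".toList).filter (fun c => !(kw1.contains c))
    kw1 ++ PySem.List.slice remaining none (some (width - (kw1.length : Int)))
  else kw1

-- order = tuple(sorted(range(width), key=lambda i: (kw[i], i)))
-- (kw[i] raises IndexError when the padded keyword is shorter than width: excluded by Pre_)
def pvOrderA (width : Int) (kw : String) : List Int :=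
  let kw2 := pvPadA width kw
  PySem.List.sorted2 (PySem.List.pyRange 0 width 1)
    (fun i => PySem.List.pyGetD kw2 i ' ') (fun i => i)

def generate_keyword_orderings (width : Int) (keywords : List String) : List (List Int) :=
  keywords.foldl (fun orderings kw => PySem.Set.add orderings (pvOrderA width kw)) PySem.Set.empty

-- ===== PORT B =====
-- for c in alphabet: break when len(chars) >= width; append c if c not in used
def pvPadLoopB (width : Int) (used : PySem.Set Char) : List Char → List Char → List Char
  | chars, [] => chars
  | chars, c :: rest =>
    if width ≤ (chars.length : Int) then chars
    else if PySem.Set.contains used c then pvPadLoopB width used chars rest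
    else pvPadLoopB width used (chars ++ [c]) rest

-- chars = list(kw.upper())[:width]; used = set(chars); then the alphabet walk above
def pvPadB (width : Int) (kw : String) : List Char :=
  let chars := PySem.List.slice (PySem.Chars.upper kw.toList) none (some width)
  pvPadLoopB width (PySem.Set.ofList chars) chars ("ABCDEFGHIJKLMNOPQRSTUVWXYZ".toList)

-- for c in sorted(set(chars)): order.extend(i for i in range(width) if chars[i] == c)
def pvOrderB (width : Int) (kw : String) : List Int :=
  let kw2 := pvPadB width kw
  (PySem.List.sorted (PySem.Set.ofList kw2) (fun c => c)).flatMap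
    (fun c => (PySem.List.pyRange 0 width 1).filter
      (fun i => PySem.List.pyGetD kw2 i ' ' == c))

-- explicit recursion over the keyword list, threading the set of seen orders
def pvCollectB (width : Int) : List String → PySem.Set (List Int) → List (List Int)
  | [], orderings => orderings
  | kw :: rest, orderings =>
      pvCollectB width rest (PySem.Set.add orderings (pvOrderB width kw))

def generate_keyword_orderings_alt (width : Int) (keywords : List String) : List (List Int) :=
  pvCollectB width keywords PySem.Set.empty

-- ===== PRECONDITION & SPEC =====
-- Pre_ excludes exactly the inputs where A raises IndexError: width exceeds the padded
-- keyword's length (only reachable for width > 26), i.e. kw[i] is accessed past the end.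
def Pre_generate_keyword_orderings (width : Int) (keywords : List String) : Prop :=
  ∀ kw ∈ keywords,
    width ≤ (kw.toList.length : Int) ∨
    width ≤ (kw.toList.length : Int) +
      ((("ABCDEFGHIJKLMNOPQRSTUVWXYZ".toList).filter
        (fun c => !((PySem.Chars.upper kw.toList).contains c))).length : Int)
instance (width : Int) (keywords : List String) : Decidable (Pre_generate_keyword_orderings width keywords) := by unfold Pre_generate_keyword_orderings; infer_instance

def pvWitness_generate_keyword_orderings : Int × List String := (4, ["key", "KEY", "abcd", ""])

def Spec_generate_keyword_orderings (width : Int) (keywords : List String) (out : List (List Int)) : Prop := out = generate_keyword_orderings_alt width keywords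
instance (width : Int) (keywords : List String) (out : List (List Int)) : Decidable (Spec_generate_keyword_orderings width keywords out) := by unfold Spec_generate_keyword_orderings; infer_instance

-- ===== CLAIM (what is proved, stated in full; the proofs are below) =====
def Claim_equal_generate_keyword_orderings : Prop := ∀ (width : Int) (keywords : List String), Dom_generate_keyword_orderings width keywords → Pre_generate_keyword_orderings width keywords → Spec_generate_keyword_orderings width keywords (generate_keyword_orderings width keywords)

-- ===== LEMMAS AND PROOFS =====

-- sorted2 with keys k1, k2 is sorted under the lexicographic key (k1 x, k2 x)
theorem pv_sorted2_eq_sorted_toLex {α κ₁ κ₂ : Type} [LinearOrder κ₁] [LinearOrder κ₂]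
    (xs : List α) (k1 : α → κ₁) (k2 : α → κ₂) :
    PySem.List.sorted2 xs k1 k2 = PySem.List.sorted xs (fun x => toLex (k1 x, k2 x)) := by
  have h : (fun (a b : α) => decide (k1 a < k1 b) || !decide (k1 b < k1 a) && decide (k2 a < k2 b))
      = (fun (a b : α) => decide (toLex (k1 a, k2 a) < toLex (k1 b, k2 b))) := by
    funext a b
    simp only [Prod.Lex.toLex_lt_toLex]
    rcases lt_trichotomy (k1 a) (k1 b) with h | h | h
    · simp [h, h.not_gt]
    · simp [h]
    · simp [h, h.not_gt, h.ne']
  unfold PySem.List.sorted2 PySem.List.sorted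
  simp only [if_neg (by decide : ¬ (false = true)), h]

-- grouping a covered list by the members of a duplicate-free list is a permutation of it
theorem pv_flatMap_filter_perm {α κ : Type} [DecidableEq κ]
    (cs : List κ) (hnd : cs.Nodup) (l : List α) (f : α → κ)
    (hcov : ∀ x ∈ l, f x ∈ cs) :
    (cs.flatMap (fun c => l.filter (fun x => f x == c))).Perm l := by
  induction cs generalizing l with
  | nil =>
    have : l = [] := List.eq_nil_iff_forall_not_mem.mpr (fun x hx => by simpa using hcov x hx)
    simp [this]
  | cons c cs ih =>
    rw [List.flatMap_cons]
    have hrest : ∀ c' ∈ cs, l.filter (fun x => f x == c')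
        = (l.filter (fun x => !(f x == c))).filter (fun x => f x == c') := by
      intro c' hc'
      rw [List.filter_filter]
      apply List.filter_congr
      intro x _
      rcases hh : decide (f x = c') with _ | _
      · simp_all
      · have : f x = c' := of_decide_eq_true hh
        have hne : c ≠ c' := fun he => (List.nodup_cons.mp hnd).1 (he ▸ hc')
        simp [this, hne.symm]
    have hfm : cs.flatMap (fun c' => l.filter (fun x => f x == c'))
        = cs.flatMap (fun c' => (l.filter (fun x => !(f x == c))).filter (fun x => f x == c')) :=
      List.flatMap_congr (by intro c' hc'; exact hrest c' hc')
    rw [hfm]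
    have ihp := ih (List.nodup_cons.mp hnd).2 (l.filter (fun x => !(f x == c)))
      (fun x hx => by
        have hxl := List.mem_of_mem_filter hx
        have := hcov x hxl
        have hne : ¬ (f x == c) = true := by
          have := (List.mem_filter.mp hx).2; simpa using this
        simp only [List.mem_cons] at this
        rcases this with h | h
        · exact absurd (by simp [h]) hne
        · exact h)
    exact (ihp.append_left (l.filter (fun x => f x == c))).trans (List.filter_append_perm _ l)

-- B's alphabet walk appends exactly the first unused letters, i.e. filter-then-take
theorem pv_padLoop_eq (width : Int) (kw1 : List Char) :
    ∀ (rest acc : List Char),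
      pvPadLoopB width (PySem.Set.ofList kw1) acc rest
        = acc ++ (rest.filter (fun c => !(kw1.contains c))).take (width.toNat - acc.length) := by
  intro rest
  induction rest with
  | nil => intro acc; simp [pvPadLoopB]
  | cons c rest ih =>
    intro acc
    unfold pvPadLoopB
    by_cases hw : width ≤ (acc.length : Int)
    · have h0 : width.toNat - acc.length = 0 := by omega
      simp [hw, h0]
    · have hcontains : PySem.Set.contains (PySem.Set.ofList kw1) c = kw1.contains c := by
        unfold PySem.Set.contains
        rcases hmem : kw1.contains c with _ | _
        · simp only [List.contains_eq_mem] at hmem ⊢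
          simpa [PySem.Set.mem_ofList] using hmem
        · simp only [List.contains_eq_mem] at hmem ⊢
          simpa [PySem.Set.mem_ofList] using hmem
      rw [if_neg hw, hcontains, List.filter_cons]
      by_cases hc : kw1.contains c = true
      · rw [if_pos hc, ih acc]
        have hm : c ∈ kw1 := by simpa using hc
        simp [hm]
      · rw [if_neg hc, ih (acc ++ [c])]
        have hn : width.toNat - acc.length = (width.toNat - (acc ++ [c]).length) + 1 := by
          simp only [List.length_append, List.length_cons, List.length_nil]
          omega
        rw [hn]
        have hm : c ∉ kw1 := by simpa using hc
        simp [hm]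

-- B's padding equals A's filter+slice padding
theorem pv_padB_eq_padA (width : Int) (kw : String) :
    pvPadB width kw = pvPadA width kw := by
  unfold pvPadB pvPadA
  set kw1 := PySem.List.slice (PySem.Chars.upper kw.toList) none (some width) with hkw1
  rw [pv_padLoop_eq]
  by_cases h : (kw1.length : Int) < width
  · rw [if_pos h]
    show kw1 ++ _ = kw1 ++ PySem.List.slice (("ABCDEFGHIJKLMNOPQRSTUVWXYZ".toList).filter
      (fun c => !(kw1.contains c))) none (some (width - (kw1.length : Int)))
    rw [PySem.List.slice_to _ (by omega : (0:Int) ≤ width - (kw1.length : Int))]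
    congr 2
    omega
  · rw [if_neg h]
    have h0 : width.toNat - kw1.length = 0 := by omega
    simp [h0]

-- the per-keyword orders agree whenever the padded keyword reaches the width
theorem pv_order_eq (width : Int) (kw : String)
    (h : width ≤ ((pvPadA width kw).length : Int)) :
    pvOrderA width kw = pvOrderB width kw := by
  unfold pvOrderA pvOrderB
  rw [pv_padB_eq_padA]
  set kw2 := pvPadA width kw with hkw2
  rw [pv_sorted2_eq_sorted_toLex]
  apply PySem.List.sorted_eq_of_perm_of_pairwise_lt
  · -- B's grouped emission is a permutation of range(width)
    apply pv_flatMap_filter_perm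
    · exact ((PySem.List.sorted_perm _ _ _).nodup_iff).mpr (PySem.Set.nodup_ofList kw2)
    · intro i hi
      have hib := (PySem.List.mem_pyRange_one).mp hi
      rw [PySem.List.mem_sorted, PySem.Set.mem_ofList,
        PySem.List.pyGetD_eq_getElem kw2 ' ' hib.1 (lt_of_lt_of_le hib.2 h)]
      exact List.getElem_mem _
  · -- and its lexicographic keys (kw[i], i) are strictly increasing
    apply List.pairwise_flatMap.mpr
    constructor
    · intro c _
      apply List.Pairwise.imp_of_mem ?_ (List.Pairwise.sublist List.filter_sublist (PySem.List.pairwise_lt_pyRange_one 0 width))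
      intro a b ha hb hab
      have hfa : PySem.List.pyGetD kw2 a ' ' = c := by simpa using (List.mem_filter.mp ha).2
      have hfb : PySem.List.pyGetD kw2 b ' ' = c := by simpa using (List.mem_filter.mp hb).2
      exact Prod.Lex.toLex_lt_toLex.mpr (Or.inr ⟨by simp [hfa, hfb], hab⟩)
    · apply (PySem.List.sorted_ofList_pairwise_lt kw2).imp
      intro c c' hcc x hx y hy
      have hfx : PySem.List.pyGetD kw2 x ' ' = c := by simpa using (List.mem_filter.mp hx).2
      have hfy : PySem.List.pyGetD kw2 y ' ' = c' := by simpa using (List.mem_filter.mp hy).2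
      exact Prod.Lex.toLex_lt_toLex.mpr (Or.inl (by simpa [hfx, hfy] using hcc))

-- Pre_'s arithmetic condition guarantees the padded keyword reaches the width
theorem pv_pre_len (width : Int) (kw : String)
    (h : width ≤ (kw.toList.length : Int) ∨
      width ≤ (kw.toList.length : Int) +
        ((("ABCDEFGHIJKLMNOPQRSTUVWXYZ".toList).filter
          (fun c => !((PySem.Chars.upper kw.toList).contains c))).length : Int)) :
    width ≤ ((pvPadA width kw).length : Int) := by
  rcases le_or_gt width 0 with hw | hw
  · exact le_trans hw (by positivity)
  · have hU : (PySem.Chars.upper kw.toList).length = kw.toList.length := by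
      simp [PySem.Chars.upper]
    unfold pvPadA
    simp only [PySem.List.slice_to _ (le_of_lt hw)]
    rcases le_or_gt width (kw.toList.length : Int) with hn | hn
    · rw [List.length_take]
      have : min width.toNat (PySem.Chars.upper kw.toList).length = width.toNat := by
        rw [hU]; omega
      rw [this]
      simp
      omega
    · have htake : (PySem.Chars.upper kw.toList).take width.toNat = PySem.Chars.upper kw.toList := by
        apply List.take_of_length_le; omega
      rw [htake]
      have hcond : ((PySem.Chars.upper kw.toList).length : Int) < width := by omega
      rw [if_pos hcond]
      rw [PySem.List.slice_to _ (by omega : (0:Int) ≤ width - ((PySem.Chars.upper kw.toList).length : Int))]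
      rcases h with h | h
      · omega
      · rw [List.length_append, List.length_take]
        rw [hU]
        omega

-- A's fold equals B's recursion when the per-keyword orders agree
theorem pv_collect_eq (width : Int) :
    ∀ (kws : List String) (acc : PySem.Set (List Int)),
      (∀ kw ∈ kws, pvOrderA width kw = pvOrderB width kw) →
      kws.foldl (fun orderings kw => PySem.Set.add orderings (pvOrderA width kw)) acc
        = pvCollectB width kws acc := by
  intro kws
  induction kws with
  | nil => intro acc _; rfl
  | cons kw rest ih =>
    intro acc hall
    rw [List.foldl_cons]
    unfold pvCollectB
    rw [hall kw (List.mem_cons_self)]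
    exact ih _ (fun k hk => hall k (List.mem_cons_of_mem _ hk))

-- ===== VERDICT (by name: the statement is the Claim_ definition above) =====
theorem generate_keyword_orderings_spec : Claim_equal_generate_keyword_orderings := by
  intro width keywords _ hpre
  unfold Spec_generate_keyword_orderings generate_keyword_orderings generate_keyword_orderings_alt
  exact pv_collect_eq width keywords PySem.Set.empty
    (fun kw hkw => pv_order_eq width kw (pv_pre_len width kw (hpre kw hkw)))
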